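-- pv_equiv track=rewrite | github.com/dawoodaijaz97/Leetcode | count-bowl-subarrays/solution.py | solve
-- ===== SOURCE A (Python) =====
-- def solve(nums: list[int]) -> int:
--     n = len(nums)
--     bowl_count = 0
--
--     for i in range(n):
--         min_val = nums[i]
--         max_val = float('-inf')
--         valid = False
--
--         for j in range(i + 1, n):
--             if nums[j] < min_val and nums[j] > max_val:
--                 valid = True
--             elif nums[j] >= min_val:
--                 break
--             else:
--                 max_val = max(max_val, nums[j])
--
--             if valid and j - i + 1 >= 3:
--                 bowl_count += 1
--
--     return bowl_count
-- ===== SOURCE B (Python) =====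
-- def solve(nums: list[int]) -> int:
--     # One right-to-left pass with a monotonic stack instead of A's nested scans.
--     # For each position i, the nearest j > i with nums[j] >= nums[i] sits on top of
--     # the stack after popping smaller values; the subarray nums[i:j+1] prefixes of
--     # length >= 3 contribute max(0, j - i - 2) bowls.  Positions are stored as
--     # distance-from-the-right (m), so j - i - 2 == m - r - 2 below.
--     total = 0
--     stack = []  # (value, position from right); values nondecreasing from the top
--     m = 0       # length of the suffix processed so far
--     for v in reversed(nums):
--         while stack and stack[-1][0] < v:
--             stack.pop()
--         r = stack[-1][1] if stack else 0
--         m += 1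
--         total += max(0, m - r - 2)
--         stack.append((v, m))
--     return total
-- ===== Notes on version B (the rewrite author's own statement) =====
-- stated objective: faster
-- what changed: Replaced A's nested restart-scan (for each start i, rescan forward until an element >= nums[i]) by a single right-to-left pass with a monotonic stack that yields the nearest >= element, adding max(0, j-i-2) per position.
import Mathlib
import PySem

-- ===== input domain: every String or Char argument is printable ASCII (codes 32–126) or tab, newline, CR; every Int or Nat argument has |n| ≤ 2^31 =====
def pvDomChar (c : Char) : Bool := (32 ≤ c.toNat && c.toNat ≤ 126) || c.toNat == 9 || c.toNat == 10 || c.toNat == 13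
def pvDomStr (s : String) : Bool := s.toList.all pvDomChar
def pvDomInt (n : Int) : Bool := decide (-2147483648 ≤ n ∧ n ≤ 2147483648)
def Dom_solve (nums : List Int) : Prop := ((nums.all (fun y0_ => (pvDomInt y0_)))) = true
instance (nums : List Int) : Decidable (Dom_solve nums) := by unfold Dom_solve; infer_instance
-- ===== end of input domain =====

-- B replaces A's nested restart-scans by one right-to-left monotonic-stack pass (measured faster; asymptotically O(n) vs O(n^2)).

-- ===== PORT A =====
-- float('-inf') is only used as a comparison/max sentinel; ported exactly as Option Int with none = -inf.
def negInfLt (x : Int) (m : Option Int) : Bool :=   -- nums[j] > max_val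
  match m with
  | none => true
  | some v => decide (v < x)

def negInfMax (m : Option Int) (x : Int) : Option Int :=   -- max(max_val, nums[j])
  match m with
  | none => some x
  | some v => some (max v x)

-- inner loop 'for j in range(i+1, n)' over the remaining suffix; d = j - i + 1, cnt = bowl_count
def innerA (minVal : Int) (maxVal : Option Int) (valid : Bool) (d : Nat) (cnt : Int) : List Int → Int
  | [] => cnt
  | x :: xs =>
    if decide (x < minVal) && negInfLt x maxVal then
      let valid := true
      let cnt := if valid && decide (d + 1 ≥ 3) then cnt + 1 else cnt
      innerA minVal maxVal valid (d + 1) cnt xs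
    else if decide (x ≥ minVal) then
      cnt   -- break
    else
      let maxVal := negInfMax maxVal x
      let cnt := if valid && decide (d + 1 ≥ 3) then cnt + 1 else cnt
      innerA minVal maxVal valid (d + 1) cnt xs

-- outer loop 'for i in range(n)': min_val = nums[i], inner loop over nums[i+1:]
def outerA (cnt : Int) : List Int → Int
  | [] => cnt
  | x :: xs => outerA (innerA x none false 1 cnt xs) xs

def solve (nums : List Int) : Int := outerA 0 nums

-- ===== PORT B =====
-- right-to-left loop = structural recursion on the list; stack entries are (value, position from right)
def rtop : List (Int × Int) → Int   -- stack[-1][1] if stack else 0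
  | [] => 0
  | p :: _ => p.2

def altRec : List Int → Int × List (Int × Int) × Int   -- (total, stack, m)
  | [] => (0, [], 0)
  | v :: rest =>
    let s := altRec rest
    let st := (s.2.1).dropWhile (fun p => decide (p.1 < v))   -- while stack and top.value < v: pop
    let r : Int := rtop st
    let m := s.2.2 + 1
    (s.1 + max 0 (m - r - 2), (v, m) :: st, m)

def solve_alt (nums : List Int) : Int := (altRec nums).1

-- ===== PRECONDITION & SPEC =====
def Spec_solve (nums : List Int) (out : Int) : Prop := out = solve_alt nums
instance (nums : List Int) (out : Int) : Decidable (Spec_solve nums out) := by unfold Spec_solve; infer_instance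

-- ===== CLAIM (what is proved, stated in full; the proofs are below) =====
def Claim_equal_solve : Prop := ∀ (nums : List Int), Dom_solve nums → Spec_solve nums (solve nums)

-- ===== LEMMAS AND PROOFS =====

-- common characterisation: contribution of each start position is max 0 (t - 1),
-- t = length of the run of strictly smaller elements just after it
def g : List Int → Int
  | [] => 0
  | x :: xs => max 0 (((xs.takeWhile (fun y => decide (y < x))).length : Int) - 1) + g xs

-- ---- A side ----
lemma innerA_true (mn : Int) (xs : List Int) : ∀ (d : Nat) (cnt : Int), 2 ≤ d →
    innerA mn none true d cnt xs = cnt + ((xs.takeWhile (fun y => decide (y < mn))).length : Int) := by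
  induction xs with
  | nil => intro d cnt _; simp [innerA]
  | cons x xs ih =>
    intro d cnt hd
    by_cases h : x < mn
    · have h3 : d + 1 ≥ 3 := by omega
      simp only [innerA, negInfLt, h, h3, decide_true, Bool.and_true, List.takeWhile_cons,
        if_pos]
      rw [ih (d + 1) (cnt + 1) (by omega)]
      simp only [List.length_cons]
      push_cast
      ring
    · simp only [innerA, negInfLt, h, decide_false, Bool.and_true, List.takeWhile_cons]
      have h' : x ≥ mn := by omega
      simp [h']

lemma innerA_start (mn : Int) (xs : List Int) (cnt : Int) :
    innerA mn none false 1 cnt xs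
      = cnt + max 0 (((xs.takeWhile (fun y => decide (y < mn))).length : Int) - 1) := by
  cases xs with
  | nil => simp [innerA]
  | cons x xs =>
    by_cases h : x < mn
    · have e : innerA mn none false 1 cnt (x :: xs) = innerA mn none true 2 cnt xs := by
        simp [innerA, negInfLt, h]
      rw [e, innerA_true mn xs 2 cnt (by omega)]
      simp only [List.takeWhile_cons, h, decide_true, if_true, List.length_cons]
      push_cast
      omega
    · have h' : x ≥ mn := by omega
      simp [innerA, negInfLt, h, h']

lemma outerA_eq (xs : List Int) : ∀ cnt : Int, outerA cnt xs = cnt + g xs := by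
  induction xs with
  | nil => intro cnt; simp [outerA, g]
  | cons x xs ih =>
    intro cnt
    rw [outerA, innerA_start, ih, g]
    ring

-- ---- B side ----
-- the stack component of altRec, on its own
def stk : List Int → List (Int × Int)
  | [] => []
  | x :: xs => (x, (xs.length : Int) + 1) :: (stk xs).dropWhile (fun p => decide (p.1 < x))

lemma dropWhile_dropWhile {α : Type} (p q : α → Bool) (l : List α)
    (h : ∀ a, q a = true → p a = true) :
    (l.dropWhile q).dropWhile p = l.dropWhile p := by
  induction l with
  | nil => rfl
  | cons x xs ih =>
    by_cases hq : q x = true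
    · have hp := h x hq
      simp [hq, hp, ih]
    · simp [List.dropWhile_cons, hq]

lemma stk_key (xs : List Int) : ∀ v : Int,
    ((xs.takeWhile (fun y => decide (y < v))).length : Int)
      = (xs.length : Int) - rtop ((stk xs).dropWhile (fun p => decide (p.1 < v))) := by
  induction xs with
  | nil => intro v; simp [stk, rtop]
  | cons x xs ih =>
    intro v
    by_cases h : x < v
    · rw [stk, List.dropWhile_cons]
      simp only [h, decide_true, if_true]
      rw [dropWhile_dropWhile _ _ _ (fun a ha => by
        simp only [decide_eq_true_eq] at ha ⊢; omega)]
      rw [List.takeWhile_cons]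
      simp only [h, decide_true, if_true, List.length_cons]
      have := ih v
      push_cast at this ⊢
      omega
    · rw [stk, List.dropWhile_cons, List.takeWhile_cons]
      simp [h, rtop]

lemma altRec_eq (xs : List Int) : altRec xs = (g xs, stk xs, (xs.length : Int)) := by
  induction xs with
  | nil => simp [altRec, g, stk]
  | cons x xs ih =>
    rw [altRec, ih]
    have hk := stk_key xs x
    simp only [g, stk, Prod.mk.injEq, List.length_cons]
    push_cast at hk ⊢
    constructor
    · omega
    · simp

-- ===== VERDICT (by name: the statement is the Claim_ definition above) =====
theorem solve_spec : Claim_equal_solve := by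
  intro nums _
  unfold Spec_solve solve solve_alt
  rw [outerA_eq, altRec_eq]
  ring
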